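-- pv_equiv track=rewrite | github.com/myeonginjin/api.fooiy.com | api.fooiy.com-main/repo/shops/tasks.py | fooiyti_scoring
-- ===== SOURCE A (Python) =====
-- fooiyti_score_impact_group: dict = {
--     "E": [
--         "inta_score",
--         "intc_score",
--         "infa_score",
--         "infc_score",
--         "ista_score",
--         "istc_score",
--         "isfa_score",
--         "isfc_score",
--     ],
--     "I": [
--         "enta_score",
--         "entc_score",
--         "enfa_score",
--         "enfc_score",
--         "esta_score",
--         "estc_score",
--         "esfa_score",
--         "esfc_score",
--     ],
--     "S": [
--         "enta_score",
--         "entc_score",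
--         "enfa_score",
--         "enfc_score",
--         "inta_score",
--         "intc_score",
--         "infa_score",
--         "infc_score",
--     ],
--     "N": [
--         "esta_score",
--         "estc_score",
--         "esfa_score",
--         "esfc_score",
--         "ista_score",
--         "istc_score",
--         "isfa_score",
--         "isfc_score",
--     ],
--     "T": [
--         "enfa_score",
--         "enfc_score",
--         "esfa_score",
--         "esfc_score",
--         "infa_score",
--         "infc_score",
--         "isfa_score",
--         "isfc_score",
--     ],
--     "F": [
--         "enta_score",
--         "entc_score",
--         "esta_score",
--         "estc_score",
--         "inta_score",
--         "intc_score",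
--         "ista_score",
--         "istc_score",
--     ],
-- }
--
-- def fooiyti_scoring(fooiyti: str, taste_evaluation: int) -> dict:
--     fooiyti_score: dict = {
--         "enta_score": taste_evaluation,
--         "entc_score": taste_evaluation,
--         "enfa_score": taste_evaluation,
--         "enfc_score": taste_evaluation,
--         "esta_score": taste_evaluation,
--         "estc_score": taste_evaluation,
--         "esfa_score": taste_evaluation,
--         "esfc_score": taste_evaluation,
--         "inta_score": taste_evaluation,
--         "intc_score": taste_evaluation,
--         "infa_score": taste_evaluation,
--         "infc_score": taste_evaluation,
--         "ista_score": taste_evaluation,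
--         "istc_score": taste_evaluation,
--         "isfa_score": taste_evaluation,
--         "isfc_score": taste_evaluation,
--     }
--
--     if taste_evaluation != 50:
--         for index, alphabet in enumerate(fooiyti[:3]):
--             for fooiyti_score_key in fooiyti_score_impact_group[alphabet]:
--                 if taste_evaluation == 70 or taste_evaluation == 99:
--                     fooiyti_score[fooiyti_score_key] -= (
--                         taste_evaluation * (2 ** (3 - index)) // 100
--                     )
--                 else:
--                     fooiyti_score[fooiyti_score_key] += (
--                         taste_evaluation * (2 ** (3 - index)) // 100
--                     )
--
--     return fooiyti_score
-- ===== SOURCE B (Python) =====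
-- fooiyti_score_impact_group: dict = {
--     "E": ["inta_score","intc_score","infa_score","infc_score","ista_score","istc_score","isfa_score","isfc_score"],
--     "I": ["enta_score","entc_score","enfa_score","enfc_score","esta_score","estc_score","esfa_score","esfc_score"],
--     "S": ["enta_score","entc_score","enfa_score","enfc_score","inta_score","intc_score","infa_score","infc_score"],
--     "N": ["esta_score","estc_score","esfa_score","esfc_score","ista_score","istc_score","isfa_score","isfc_score"],
--     "T": ["enfa_score","enfc_score","esfa_score","esfc_score","infa_score","infc_score","isfa_score","isfc_score"],
--     "F": ["enta_score","entc_score","esta_score","estc_score","inta_score","intc_score","ista_score","istc_score"],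
-- }
--
-- _SCORE_KEYS = [
--     "enta_score","entc_score","enfa_score","enfc_score",
--     "esta_score","estc_score","esfa_score","esfc_score",
--     "inta_score","intc_score","infa_score","infc_score",
--     "ista_score","istc_score","isfa_score","isfc_score",
-- ]
--
-- def fooiyti_scoring(fooiyti: str, taste_evaluation: int) -> dict:
--     if taste_evaluation == 50:
--         return {key: taste_evaluation for key in _SCORE_KEYS}
--     groups = [fooiyti_score_impact_group[alphabet] for alphabet in fooiyti[:3]]
--     sign = -1 if taste_evaluation in (70, 99) else 1
--     result = {}
--     for key in _SCORE_KEYS: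
--         score = taste_evaluation
--         for index, group in enumerate(groups):
--             if key in group:
--                 score += sign * (taste_evaluation * (2 ** (3 - index)) // 100)
--         result[key] = score
--     return result
-- ===== Notes on version B (the rewrite author's own statement) =====
-- stated objective: alternative
-- what changed: B inverts A's loop nesting: it precomputes the three impact groups and a sign factor once, then computes each of the 16 score keys independently by a pure fold over the enumerated groups, building the result dict in one pass with no in-place dict mutation.
import Mathlib
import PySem

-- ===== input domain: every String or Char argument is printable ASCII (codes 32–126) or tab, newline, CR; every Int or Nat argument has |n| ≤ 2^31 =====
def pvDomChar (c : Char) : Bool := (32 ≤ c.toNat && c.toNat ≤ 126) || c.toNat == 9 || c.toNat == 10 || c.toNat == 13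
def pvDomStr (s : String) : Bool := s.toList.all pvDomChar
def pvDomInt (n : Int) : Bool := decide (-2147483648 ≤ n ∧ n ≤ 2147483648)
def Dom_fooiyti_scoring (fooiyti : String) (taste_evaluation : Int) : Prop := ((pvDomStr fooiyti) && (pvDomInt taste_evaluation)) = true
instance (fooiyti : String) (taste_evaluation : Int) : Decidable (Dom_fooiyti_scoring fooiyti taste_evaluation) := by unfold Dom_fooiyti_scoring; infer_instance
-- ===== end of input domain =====

-- B transposes A's nested loops: it precomputes the three impact groups and a sign, then
-- computes each of the 16 score keys independently by scanning the groups (objective: alternative).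


-- ===== PORT A =====
-- module constant fooiyti_score_impact_group (keys are the single characters Python iterates over)
def pvImpactGroup : PySem.Dict Char (List String) := PySem.Dict.mk
  [ ('E', ["inta_score","intc_score","infa_score","infc_score","ista_score","istc_score","isfa_score","isfc_score"]),
    ('I', ["enta_score","entc_score","enfa_score","enfc_score","esta_score","estc_score","esfa_score","esfc_score"]),
    ('S', ["enta_score","entc_score","enfa_score","enfc_score","inta_score","intc_score","infa_score","infc_score"]),
    ('N', ["esta_score","estc_score","esfa_score","esfc_score","ista_score","istc_score","isfa_score","isfc_score"]),
    ('T', ["enfa_score","enfc_score","esfa_score","esfc_score","infa_score","infc_score","isfa_score","isfc_score"]),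
    ('F', ["enta_score","entc_score","esta_score","estc_score","inta_score","intc_score","ista_score","istc_score"]) ]

-- the literal fooiyti_score dict A starts from
def pvBase (t : Int) : PySem.Dict String Int := PySem.Dict.mk
  [ ("enta_score", t), ("entc_score", t), ("enfa_score", t), ("enfc_score", t),
    ("esta_score", t), ("estc_score", t), ("esfa_score", t), ("esfc_score", t),
    ("inta_score", t), ("intc_score", t), ("infa_score", t), ("infc_score", t),
    ("ista_score", t), ("istc_score", t), ("isfa_score", t), ("isfc_score", t) ]

def fooiyti_scoring (fooiyti : String) (taste_evaluation : Int) : List (String × Int) :=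
  let score0 : PySem.Dict String Int := pvBase taste_evaluation
  let score :=
    if taste_evaluation ≠ 50 then
      (PySem.List.enumerate (PySem.Str.slice fooiyti none (some 3)).toList 0).foldl
        (fun d p =>
          match pvImpactGroup.get? p.2 with
          | some grp =>
            grp.foldl (fun d key =>
              if taste_evaluation = 70 ∨ taste_evaluation = 99 then
                d.modify key 0 (fun v => v - PySem.Int.floordiv (taste_evaluation * 2 ^ (3 - p.1).toNat) 100)
              else
                d.modify key 0 (fun v => v + PySem.Int.floordiv (taste_evaluation * 2 ^ (3 - p.1).toNat) 100)) d
          | none => d)   -- Python raises KeyError here; excluded by Pre_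
        score0
    else score0
  score.items

-- ===== PORT B =====
def pvScoreKeys : List String :=
  [ "enta_score","entc_score","enfa_score","enfc_score",
    "esta_score","estc_score","esfa_score","esfc_score",
    "inta_score","intc_score","infa_score","infc_score",
    "ista_score","istc_score","isfa_score","isfc_score" ]

def fooiyti_scoring_alt (fooiyti : String) (taste_evaluation : Int) : List (String × Int) :=
  if taste_evaluation = 50 then pvScoreKeys.map (fun key => (key, taste_evaluation))
  else
    let groups := (PySem.Str.slice fooiyti none (some 3)).toList.map
      (fun alphabet => (pvImpactGroup.get? alphabet).getD [])   -- Python raises KeyError on none; excluded by Pre_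
    let sign : Int := if taste_evaluation = 70 ∨ taste_evaluation = 99 then -1 else 1
    pvScoreKeys.map (fun key =>
      (key, (PySem.List.enumerate groups 0).foldl
        (fun score p =>
          if key ∈ p.2 then
            score + sign * PySem.Int.floordiv (taste_evaluation * 2 ^ (3 - p.1).toNat) 100
          else score) taste_evaluation))

-- ===== PRECONDITION & SPEC =====
-- Pre_ excludes exactly the inputs where A raises KeyError (taste_evaluation ≠ 50 with one of the
-- first three characters outside "EISNTF"); B raises KeyError on the same inputs.
def pvValidChar (c : Char) : Bool :=
  c == 'E' || c == 'I' || c == 'S' || c == 'N' || c == 'T' || c == 'F'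
def Pre_fooiyti_scoring (fooiyti : String) (taste_evaluation : Int) : Prop :=
  taste_evaluation = 50 ∨ (fooiyti.toList.take 3).all pvValidChar = true
instance (fooiyti : String) (taste_evaluation : Int) : Decidable (Pre_fooiyti_scoring fooiyti taste_evaluation) := by unfold Pre_fooiyti_scoring; infer_instance
def pvWitness_fooiyti_scoring : String × Int := ("ENF", 80)

def Spec_fooiyti_scoring (fooiyti : String) (taste_evaluation : Int) (out : List (String × Int)) : Prop := out = fooiyti_scoring_alt fooiyti taste_evaluation
instance (fooiyti : String) (taste_evaluation : Int) (out : List (String × Int)) : Decidable (Spec_fooiyti_scoring fooiyti taste_evaluation out) := by unfold Spec_fooiyti_scoring; infer_instance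

-- ===== CLAIM (what is proved, stated in full; the proofs are below) =====
def Claim_equal_fooiyti_scoring : Prop := ∀ (fooiyti : String) (taste_evaluation : Int), Dom_fooiyti_scoring fooiyti taste_evaluation → Pre_fooiyti_scoring fooiyti taste_evaluation → Spec_fooiyti_scoring fooiyti taste_evaluation (fooiyti_scoring fooiyti taste_evaluation)

-- ===== LEMMAS AND PROOFS =====

-- the group a valid character maps to, and its facts
def pvGrp (c : Char) : List String := (pvImpactGroup.get? c).getD []

theorem pvGrp_facts (c : Char) (hc : pvValidChar c = true) :
    pvImpactGroup.get? c = some (pvGrp c) ∧ (pvGrp c).Nodup ∧ ∀ k ∈ pvGrp c, k ∈ pvScoreKeys := by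
  simp [pvValidChar] at hc
  obtain rfl | rfl | rfl | rfl | rfl | rfl :
      c = 'E' ∨ c = 'I' ∨ c = 'S' ∨ c = 'N' ∨ c = 'T' ∨ c = 'F' := by tauto
  all_goals exact ⟨rfl, by decide, by decide⟩

-- inner loop: value of one key after modifying every key of a Nodup group
theorem pvInner_getD (g : List String) (hg : g.Nodup) (f : Int → Int)
    (d : PySem.Dict String Int) (x : String) :
    (g.foldl (fun d key => d.modify key 0 f) d).getD x 0
      = if x ∈ g then f (d.getD x 0) else d.getD x 0 := by
  induction g generalizing d with
  | nil => simp
  | cons a g ih =>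
    simp only [List.foldl_cons, List.nodup_cons] at *
    rw [ih hg.2]
    rcases eq_or_ne x a with rfl | hxa
    · simp [hg.1]
    · simp [PySem.Dict.getD_modify, hxa, List.mem_cons]

-- inner loop: keys are unchanged when every modified key is already present
theorem pvInner_keys (g : List String) (d : PySem.Dict String Int) (f : Int → Int)
    (h : ∀ k ∈ g, k ∈ d.keys) :
    (g.foldl (fun d key => d.modify key 0 f) d).keys = d.keys := by
  induction g generalizing d with
  | nil => rfl
  | cons a g ih =>
    simp only [List.foldl_cons]
    rw [ih]
    · rw [PySem.Dict.keys_modify, PySem.Dict.keys_insert_of_contains]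
      rw [PySem.Dict.contains_iff_mem_keys]
      exact h a (by simp)
    · intro k hk
      rw [PySem.Dict.keys_modify, PySem.Dict.keys_insert_of_contains]
      · exact h k (by simp [hk])
      · rw [PySem.Dict.contains_iff_mem_keys]; exact h a (by simp)

theorem pvBase_keys (t : Int) : (pvBase t).keys = pvScoreKeys := rfl

theorem pvBase_getD (t : Int) (k : String) (hk : k ∈ pvScoreKeys) : (pvBase t).getD k 0 = t := by
  fin_cases hk <;> rfl

-- enumerate commutes with map
theorem pvEnumerate_map {α β : Type} (g : α → β) (l : List α) (s : Int) :
    PySem.List.enumerate (l.map g) s = (PySem.List.enumerate l s).map (fun p => (p.1, g p.2)) := by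
  induction l generalizing s with
  | nil => simp [PySem.List.enumerate_nil]
  | cons a l ih => simp [PySem.List.enumerate_cons, ih]

-- outer fold, value of one key
theorem pvOuter_getD (ps : List (Int × Char)) (hps : ∀ p ∈ ps, pvValidChar p.2 = true)
    (f : Int → Int → Int) (d : PySem.Dict String Int) (x : String) :
    (ps.foldl (fun d p =>
        match pvImpactGroup.get? p.2 with
        | some grp => grp.foldl (fun d key => d.modify key 0 (f p.1)) d
        | none => d) d).getD x 0
      = ps.foldl (fun v p => if x ∈ pvGrp p.2 then f p.1 v else v) (d.getD x 0) := by
  induction ps generalizing d with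
  | nil => rfl
  | cons p ps ih =>
    obtain ⟨h1, h2, _⟩ := pvGrp_facts p.2 (hps p (by simp))
    simp only [List.foldl_cons, h1]
    rw [ih (fun q hq => hps q (by simp [hq])), pvInner_getD _ h2]

-- outer fold, keys unchanged
theorem pvOuter_keys (ps : List (Int × Char)) (hps : ∀ p ∈ ps, pvValidChar p.2 = true)
    (f : Int → Int → Int) (d : PySem.Dict String Int) (hd : d.keys = pvScoreKeys) :
    (ps.foldl (fun d p =>
        match pvImpactGroup.get? p.2 with
        | some grp => grp.foldl (fun d key => d.modify key 0 (f p.1)) d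
        | none => d) d).keys = pvScoreKeys := by
  induction ps generalizing d with
  | nil => exact hd
  | cons p ps ih =>
    obtain ⟨h1, _, h3⟩ := pvGrp_facts p.2 (hps p (by simp))
    simp only [List.foldl_cons, h1]
    refine ih (fun q hq => hps q (by simp [hq])) _ ?_
    rw [pvInner_keys _ _ _ (fun k hk => by rw [hd]; exact h3 k hk)]
    exact hd

-- A's whole fold, as a map over the 16 keys
theorem pvBridge (l : List Char) (hvalid : ∀ c ∈ l, pvValidChar c = true)
    (t : Int) (f : Int → Int → Int) :
    (List.foldl (fun d p =>
        match pvImpactGroup.get? p.2 with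
        | some grp => grp.foldl (fun d key => d.modify key 0 (f p.1)) d
        | none => d) (pvBase t) (PySem.List.enumerate l)).items
      = pvScoreKeys.map (fun key =>
          (key, (PySem.List.enumerate l).foldl
            (fun v p => if key ∈ pvGrp p.2 then f p.1 v else v) t)) := by
  have hps : ∀ p ∈ PySem.List.enumerate l, pvValidChar p.2 = true := by
    intro p hp
    rw [PySem.List.mem_enumerate_iff] at hp
    obtain ⟨k, hk, rfl⟩ := hp
    exact hvalid _ (List.getElem_mem hk)
  have hkeys := pvOuter_keys (PySem.List.enumerate l) hps f (pvBase t) (pvBase_keys t)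
  rw [PySem.Dict.items_eq_map_keys _ (by rw [hkeys]; decide) 0, hkeys]
  refine List.map_congr_left ?_
  intro k hk
  rw [pvOuter_getD _ hps, pvBase_getD t k hk]

theorem fooiyti_scoring_spec : Claim_equal_fooiyti_scoring := by
  intro fo t _ hpre
  unfold Spec_fooiyti_scoring
  by_cases h50 : t = 50
  · subst h50
    simp [fooiyti_scoring, fooiyti_scoring_alt]
    rfl
  · have hvalid : ∀ c ∈ fo.toList.take 3, pvValidChar c = true := by
      rcases hpre with h | h
      · exact absurd h h50
      · exact List.all_eq_true.mp h
    have hl : (PySem.Str.slice fo none (some 3)).toList = fo.toList.take 3 := by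
      rw [PySem.Str.toList_slice, PySem.Chars.slice_eq_listSlice,
        PySem.List.slice_to _ (by norm_num)]
      rfl
    set l := fo.toList.take 3 with hldef
    have hBfold : ∀ (sign : Int) (key : String),
        (PySem.List.enumerate (l.map (fun alphabet => (pvImpactGroup.get? alphabet).getD []))).foldl
          (fun score p => if key ∈ p.2 then score + sign * PySem.Int.floordiv (t * 2 ^ (3 - p.1).toNat) 100 else score) t
        = (PySem.List.enumerate l).foldl
          (fun v p => if key ∈ pvGrp p.2 then v + sign * PySem.Int.floordiv (t * 2 ^ (3 - p.1).toNat) 100 else v) t := by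
      intro sign key
      rw [pvEnumerate_map, List.foldl_map]
      rfl
    by_cases hsp : t = 70 ∨ t = 99
    · simp only [fooiyti_scoring, fooiyti_scoring_alt, if_pos hsp, ne_eq, h50, not_false_iff,
        if_true, if_false, hl]
      rw [pvBridge l hvalid t (fun i v => v - PySem.Int.floordiv (t * 2 ^ (3 - i).toNat) 100)]
      refine List.map_congr_left ?_
      intro key _
      rw [hBfold (-1) key]
      refine congrArg _ (PySem.List.foldl_congr_mem _ _ _ _ ?_)
      intro acc p _
      split <;> ring
    · simp only [fooiyti_scoring, fooiyti_scoring_alt, if_neg hsp, ne_eq, h50, not_false_iff,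
        if_true, if_false, hl]
      rw [pvBridge l hvalid t (fun i v => v + PySem.Int.floordiv (t * 2 ^ (3 - i).toNat) 100)]
      refine List.map_congr_left ?_
      intro key _
      rw [hBfold 1 key]
      refine congrArg _ (PySem.List.foldl_congr_mem _ _ _ _ ?_)
      intro acc p _
      split <;> ring
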